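-- pv_equiv track=rewrite | github.com/anand1115/Dynamic-Programming-Test | Dynamic_Practice_Test/Test_Amazon/make_array_good.py | lis_of_k
-- ===== SOURCE A (Python) =====
-- from typing import List
-- from collections import defaultdict
-- import bisect
--
-- def lis_of_k(arr: List[int], k):
--     n = len(arr)
--     dic = defaultdict(list)
--
--     for i,val in enumerate(arr):
--         imod = i%k
--         idx = bisect.bisect_right(dic[imod], val)
--         if idx == len(dic[imod]):
--             dic[imod].append(val)
--         else:
--             dic[imod][idx] = val
--
--     acc = 0
--     for key,lst in dic.items():
--         ln = (n-1-key)//k + 1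
--         acc += ln-len(lst)
--
--     return acc
-- ===== SOURCE B (Python) =====
-- from typing import List
--
--
-- def _lnds_len(seq):
--     # length of the longest non-decreasing subsequence, classic O(m^2) DP
--     pairs = []  # (value, best subsequence length ending at that value)
--     for x in seq:
--         best = 0
--         for y, d in pairs:
--             if y <= x and best < d:
--                 best = d
--         pairs.append((x, best + 1))
--     lis = 0
--     for _, d in pairs:
--         lis = max(lis, d)
--     return lis
--
--
-- def lis_of_k(arr: List[int], k):
--     buckets = {}
--     for i, x in enumerate(arr):
--         buckets.setdefault(i % k, []).append(x)
--     total = 0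
--     for seq in buckets.values():
--         total += len(seq) - _lnds_len(seq)
--     return total
-- ===== Notes on version B (the rewrite author's own statement) =====
-- stated objective: alternative
-- what changed: Replaces the patience/bisect pile kept per index-mod-k class plus a floor-division count formula by plainly grouping the elements into buckets and computing each bucket's longest non-decreasing subsequence length with the classic quadratic DP, summing len(bucket) - lis (trades A's O(log) inner step for a plainer quadratic scan).
-- outside the precondition, e.g. on lis_of_k([1, 2, 3], -1): A returns -4, B returns 0; on lis_of_k([1], 0): A raises ZeroDivisionError, B raises ZeroDivisionError
import Mathlib
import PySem

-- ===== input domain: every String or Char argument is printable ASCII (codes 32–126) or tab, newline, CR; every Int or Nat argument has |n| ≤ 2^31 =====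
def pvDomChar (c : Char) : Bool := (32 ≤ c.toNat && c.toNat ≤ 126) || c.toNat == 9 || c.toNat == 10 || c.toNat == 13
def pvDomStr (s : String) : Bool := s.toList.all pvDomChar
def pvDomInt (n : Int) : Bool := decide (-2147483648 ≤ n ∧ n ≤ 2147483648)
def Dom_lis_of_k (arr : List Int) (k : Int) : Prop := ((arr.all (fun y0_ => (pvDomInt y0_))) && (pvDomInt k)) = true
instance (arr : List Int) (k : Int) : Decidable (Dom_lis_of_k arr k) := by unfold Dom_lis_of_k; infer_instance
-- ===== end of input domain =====

-- B replaces A's per-class patience/bisect pile and floor-division count formula by plain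
-- bucketing plus the classic quadratic longest-non-decreasing-subsequence DP ("alternative";
-- no speed claim). A mutates nothing observable; equivalence is about the return value.


-- ===== PORT A =====
-- one step of A's loop: defaultdict read dic[i%k] (inserts [] if absent), bisect_right, append/overwrite
def pvStepA (k : Int) (d : PySem.Dict Int (List Int)) (p : Int × Int) : PySem.Dict Int (List Int) :=
  let imod := PySem.Int.mod p.1 k
  let d := d.setdefault imod []          -- defaultdict: reading dic[imod] creates the [] entry
  let cur := d.getD imod []
  let idx := PySem.List.bisectRight cur p.2
  if idx = cur.length then d.insert imod (cur ++ [p.2]) else d.insert imod (cur.set idx p.2)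

def lis_of_k (arr : List Int) (k : Int) : Int :=
  let n : Int := (arr.length : Int)
  let dic := (PySem.List.enumerate arr 0).foldl (pvStepA k) PySem.Dict.empty
  dic.items.foldl
    (fun acc p => acc + (PySem.Int.floordiv (n - 1 - p.1) k + 1 - (p.2.length : Int))) 0

-- ===== PORT B =====
-- helper _lnds_len of Source B: O(m^2) DP for the longest non-decreasing subsequence length
def pvBest (ps : List (Int × Int)) (x : Int) : Int :=
  ps.foldl (fun b q => if q.1 ≤ x ∧ b < q.2 then q.2 else b) 0

def pvDp (seq : List Int) : List (Int × Int) :=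
  seq.foldl (fun ps x => ps ++ [(x, pvBest ps x + 1)]) []

def pvLnds (seq : List Int) : Int :=
  (pvDp seq).foldl (fun m q => max m q.2) 0

-- one step of Source B's grouping loop: buckets.setdefault(i % k, []).append(x)
def pvStepB (k : Int) (d : PySem.Dict Int (List Int)) (p : Int × Int) : PySem.Dict Int (List Int) :=
  d.insert (PySem.Int.mod p.1 k) (d.getD (PySem.Int.mod p.1 k) [] ++ [p.2])

def lis_of_k_alt (arr : List Int) (k : Int) : Int :=
  let buckets := (PySem.List.enumerate arr 0).foldl (pvStepB k) PySem.Dict.empty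
  buckets.values.foldl (fun total seq => total + ((seq.length : Int) - pvLnds seq)) 0

-- ===== PRECONDITION & SPEC =====
-- Pre_ excludes k ≤ 0: k = 0 raises ZeroDivisionError in A, and a negative k is outside the
-- natural domain of the modulus parameter (there A's floor-division count formula returns
-- meaningless negative totals that no caller could want).
def Pre_lis_of_k (arr : List Int) (k : Int) : Prop := 1 ≤ k
instance (arr : List Int) (k : Int) : Decidable (Pre_lis_of_k arr k) := by
  unfold Pre_lis_of_k; infer_instance

def pvWitness_lis_of_k : List Int × Int := ([3, 1, 2, 5, 0, 7], 2)

def Spec_lis_of_k (arr : List Int) (k : Int) (out : Int) : Prop := out = lis_of_k_alt arr k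
instance (arr : List Int) (k : Int) (out : Int) : Decidable (Spec_lis_of_k arr k out) := by
  unfold Spec_lis_of_k; infer_instance

-- ===== CLAIM (what is proved, stated in full; the proofs are below) =====
def Claim_equal_lis_of_k : Prop :=
  ∀ (arr : List Int) (k : Int), Dom_lis_of_k arr k → Pre_lis_of_k arr k →
    Spec_lis_of_k arr k (lis_of_k arr k)

-- ===== LEMMAS AND PROOFS =====

-- A's per-class state, as a function of the class's element list: one patience step
def pileStep (cur : List Int) (x : Int) : List Int :=
  let idx := PySem.List.bisectRight cur x
  if idx = cur.length then cur ++ [x] else cur.set idx x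

def pileOf (s : List Int) : List Int := s.foldl pileStep []

-- first components of the dp pairs whose length is at least r
def pvSel (ps : List (Int × Int)) (r : Nat) : List Int :=
  (ps.filter (fun q => (r : Int) ≤ q.2)).map Prod.fst

lemma bisectRight_nil (x : Int) : PySem.List.bisectRight ([] : List Int) x = 0 :=
  Nat.le_zero.mp (PySem.List.bisectRight_spec [] x (by simp)).1

lemma min?_concat_none {l : List Int} (x : Int) (h : l.min? = none) :
    (l ++ [x]).min? = some x := by
  rw [List.min?_eq_none_iff.mp h]; rfl

lemma min?_concat_some {l : List Int} {m : Int} (x : Int) (h : l.min? = some m) :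
    (l ++ [x]).min? = some (min m x) := by
  cases l with
  | nil => simp [List.min?] at h
  | cons a t =>
    rw [List.min?_cons', Option.some.injEq] at h
    rw [List.cons_append, List.min?_cons', List.foldl_append]
    simp [h]

lemma min?_le_of_mem {l : List Int} {m a : Int} (h : l.min? = some m) (ha : a ∈ l) :
    m ≤ a := by
  cases l with
  | nil => simp [List.min?] at h
  | cons b t =>
    rw [List.min?_cons', Option.some.injEq] at h
    subst h
    rcases List.mem_cons.mp ha with rfl | ha'
    · exact (PySem.List.foldl_min_le t a).1
    · exact (PySem.List.foldl_min_le t b).2 a ha'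

lemma pvBest_eq_filter (ps : List (Int × Int)) (x : Int) :
    pvBest ps x = ((ps.filter (fun q => decide (q.1 ≤ x))).map Prod.snd).foldl max 0 := by
  unfold pvBest
  rw [List.foldl_map]
  rw [show (fun (b : Int) (q : Int × Int) => if q.1 ≤ x ∧ b < q.2 then q.2 else b)
        = (fun (b : Int) (q : Int × Int) => if q.1 ≤ x then max b q.2 else b) from by
    funext b q; by_cases h1 : q.1 ≤ x <;> by_cases h2 : b < q.2 <;>
      simp [h1, h2] <;> omega]
  exact PySem.List.foldl_ite_eq_foldl_filter (fun q => q.1 ≤ x) (fun b q => max b q.2) ps 0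

lemma pile_inv (s : List Int) :
    (pileOf s).Pairwise (· ≤ ·) ∧ (∀ p ∈ pvDp s, 1 ≤ p.2) ∧
      (∀ r : Nat, (pvSel (pvDp s) (r + 1)).min? = (pileOf s)[r]?) := by
  induction s using List.reverseRecOn with
  | nil => refine ⟨by simp [pileOf], by simp [pvDp], ?_⟩
           intro r; simp [pvDp, pvSel, pileOf]
  | append_singleton t x ih =>
    obtain ⟨hsort, hpos, hmin⟩ := ih
    set q := pileOf t with hq
    set ps := pvDp t with hps
    set idx := PySem.List.bisectRight q x with hidx
    obtain ⟨hle, hmem, hgt⟩ := PySem.List.bisectRight_spec q x hsort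
    have hdp : pvDp (t ++ [x]) = ps ++ [(x, pvBest ps x + 1)] := by
      simp [pvDp, List.foldl_append, hps]
    have hpile : pileOf (t ++ [x]) = pileStep q x := by
      simp [pileOf, List.foldl_append, hq]
    -- best = idx
    have hbest : pvBest ps x = (idx : Int) := by
      rw [pvBest_eq_filter]
      set F := ((ps.filter (fun q => decide (q.1 ≤ x))).map Prod.snd) with hF
      have hub : ∀ d ∈ F, d ≤ (idx : Int) := by
        intro d hd
        simp only [hF, List.mem_map, List.mem_filter, decide_eq_true_eq] at hd
        obtain ⟨p, ⟨hpps, hpx⟩, rfl⟩ := hd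
        by_contra hcon
        have hsel : p.1 ∈ pvSel ps (idx + 1) := by
          simp only [pvSel, List.mem_map, List.mem_filter, decide_eq_true_eq]
          exact ⟨p, ⟨hpps, by push_cast; omega⟩, rfl⟩
        have := hmin idx
        rcases Nat.lt_or_ge idx q.length with hl | hl
        · rw [List.getElem?_eq_getElem hl] at this
          have h1 := min?_le_of_mem this hsel
          have h2 := hgt idx hl (le_refl idx)
          omega
        · rw [List.getElem?_eq_none hl] at this
          rw [List.min?_eq_none_iff.mp this] at hsel
          simp at hsel
      have hlb : (idx : Int) ≤ F.foldl max 0 := by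
        rcases Nat.eq_zero_or_pos idx with h0 | h0
        · have := (PySem.List.le_foldl_max F 0).1
          omega
        · have hl1 : idx - 1 < q.length := by omega
          have := hmin (idx - 1)
          rw [Nat.sub_add_cancel h0, List.getElem?_eq_getElem hl1] at this
          have hmemq : q[idx - 1] ∈ pvSel ps idx := List.min?_mem this
          simp only [pvSel, List.mem_map, List.mem_filter, decide_eq_true_eq] at hmemq
          obtain ⟨p, ⟨hpps, hpd⟩, hp1⟩ := hmemq
          have hx : p.1 ≤ x := by rw [hp1]; exact hmem (idx - 1) hl1 (by omega)
          have hpF : p.2 ∈ F := by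
            simp only [hF, List.mem_map, List.mem_filter, decide_eq_true_eq]
            exact ⟨p, ⟨hpps, hx⟩, rfl⟩
          have := (PySem.List.le_foldl_max F 0).2 p.2 hpF
          omega
      have hub' : F.foldl max 0 ≤ (idx : Int) := by
        rcases PySem.List.foldl_max_mem F 0 with h | h
        · omega
        · exact hub _ h
      omega
    rw [hdp, hpile, hbest]
    have hsingle : ∀ (v : Int) (r : Nat), pvSel [(x, v)] r = if (r : Int) ≤ v then [x] else [] := by
      intro v r
      by_cases h : (r : Int) ≤ v
      · simp [pvSel, h]
      · simp [pvSel, h]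
    have hself : ∀ r : Nat, pvSel (ps ++ [(x, (idx : Int) + 1)]) (r + 1)
        = pvSel ps (r + 1) ++ (if r ≤ idx then [x] else []) := by
      intro r
      have hsplit : pvSel (ps ++ [(x, (idx : Int) + 1)]) (r + 1)
          = pvSel ps (r + 1) ++ pvSel [(x, (idx : Int) + 1)] (r + 1) := by
        simp [pvSel, List.filter_append]
      rw [hsplit, hsingle]
      by_cases h : r ≤ idx
      · rw [if_pos h, if_pos (by push_cast; omega)]
      · rw [if_neg h, if_neg (by push_cast; omega)]
    unfold pileStep
    rw [← hidx]
    by_cases hc : idx = q.length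
    · rw [if_pos hc]
      refine ⟨?_, ?_, ?_⟩
      · rw [List.pairwise_append]
        refine ⟨hsort, by simp, ?_⟩
        intro a ha b hb
        simp only [List.mem_singleton] at hb
        subst hb
        obtain ⟨j, hj, rfl⟩ := List.mem_iff_getElem.mp ha
        exact hmem j hj (by omega)
      · intro p hp
        rcases List.mem_append.mp hp with h | h
        · exact hpos p h
        · simp only [List.mem_singleton] at h; subst h; simp
      · intro r
        rw [hself r]
        rcases Nat.lt_trichotomy r idx with hr | hr | hr
        · rw [if_pos (le_of_lt hr)]
          have hrlen : r < q.length := by omega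
          have h1 := hmin r
          rw [List.getElem?_eq_getElem hrlen] at h1
          rw [min?_concat_some x h1, List.getElem?_append_left (by simpa using hrlen)]
          rw [List.getElem?_eq_getElem hrlen]
          have := hmem r hrlen hr
          simp [min_eq_left this]
        · subst hr
          rw [if_pos le_rfl]
          have h1 := hmin idx
          rw [List.getElem?_eq_none (by omega)] at h1
          rw [min?_concat_none x h1]
          rw [hc, List.getElem?_concat_length]
        · rw [if_neg (by omega)]
          simp only [List.append_nil]
          have h1 := hmin r
          rw [List.getElem?_eq_none (by omega)] at h1
          rw [h1, List.getElem?_eq_none (by simp only [List.length_append]; simp; omega)]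
    · rw [if_neg hc]
      have hlt : idx < q.length := lt_of_le_of_ne hle hc
      have hsort' : (q.set idx x).Pairwise (· ≤ ·) := by
        rw [List.pairwise_iff_getElem] at hsort ⊢
        intro i j hi hj hij
        simp only [List.length_set] at hi hj
        rw [List.getElem_set, List.getElem_set]
        by_cases h1 : idx = i
        · subst h1
          rw [if_pos rfl, if_neg (by omega)]
          exact le_of_lt (hgt j hj (by omega))
        · rw [if_neg h1]
          by_cases h2 : idx = j
          · subst h2
            rw [if_pos rfl]
            exact hmem i hi (by omega)
          · rw [if_neg h2]
            exact hsort i j hi hj hij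
      refine ⟨hsort', ?_, ?_⟩
      · intro p hp
        rcases List.mem_append.mp hp with h | h
        · exact hpos p h
        · simp only [List.mem_singleton] at h; subst h; simp
      · intro r
        rw [hself r]
        rcases Nat.lt_trichotomy r idx with hr | hr | hr
        · rw [if_pos (le_of_lt hr)]
          have hrlen : r < q.length := by omega
          have h1 := hmin r
          rw [List.getElem?_eq_getElem hrlen] at h1
          rw [min?_concat_some x h1]
          rw [List.getElem?_set_ne (by omega), List.getElem?_eq_getElem hrlen]
          have := hmem r hrlen hr
          simp [min_eq_left this]
        · subst hr
          rw [if_pos le_rfl]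
          have h1 := hmin idx
          rw [List.getElem?_eq_getElem hlt] at h1
          rw [min?_concat_some x h1]
          rw [List.getElem?_set_self (by omega)]
          have := hgt idx hlt le_rfl
          simp [min_eq_right (le_of_lt this)]
        · rw [if_neg (by omega)]
          simp only [List.append_nil]
          rw [List.getElem?_set_ne (by omega)]
          exact hmin r

lemma pvLnds_eq_pileLen (s : List Int) : pvLnds s = ((pileOf s).length : Int) := by
  obtain ⟨_, hpos, hmin⟩ := pile_inv s
  set L := (pileOf s).length with hL
  unfold pvLnds
  rw [show (fun (m : Int) (q : Int × Int) => max m q.2)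
        = (fun (m : Int) (q : Int × Int) => max m (Prod.snd q)) from rfl,
      ← List.foldl_map]
  set F := (pvDp s).map Prod.snd with hF
  have hub : ∀ d ∈ F, d ≤ (L : Int) := by
    intro d hd
    simp only [hF, List.mem_map] at hd
    obtain ⟨p, hpps, rfl⟩ := hd
    by_contra hcon
    have hsel : p.1 ∈ pvSel (pvDp s) (L + 1) := by
      simp only [pvSel, List.mem_map, List.mem_filter, decide_eq_true_eq]
      exact ⟨p, ⟨hpps, by push_cast; omega⟩, rfl⟩
    have h1 := hmin L
    rw [List.getElem?_eq_none (by omega)] at h1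
    rw [List.min?_eq_none_iff.mp h1] at hsel
    simp at hsel
  have hub' : F.foldl max 0 ≤ (L : Int) := by
    rcases PySem.List.foldl_max_mem F 0 with h | h
    · omega
    · exact hub _ h
  have hlb : (L : Int) ≤ F.foldl max 0 := by
    rcases Nat.eq_zero_or_pos L with h0 | h0
    · have := (PySem.List.le_foldl_max F 0).1
      omega
    · have hl1 : L - 1 < L := by omega
      have h1 := hmin (L - 1)
      rw [Nat.sub_add_cancel h0, List.getElem?_eq_getElem hl1] at h1
      have hmemq := List.min?_mem h1
      simp only [pvSel, List.mem_map, List.mem_filter, decide_eq_true_eq] at hmemq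
      obtain ⟨p, ⟨hpps, hpd⟩, _⟩ := hmemq
      have hpF : p.2 ∈ F := by simp only [hF, List.mem_map]; exact ⟨p, hpps, rfl⟩
      have := (PySem.List.le_foldl_max F 0).2 p.2 hpF
      omega
  omega

lemma pileOf_concat (l : List Int) (x : Int) :
    pileOf (l ++ [x]) = pileStep (pileOf l) x := by
  simp [pileOf, List.foldl_append]

-- arithmetic: the per-class counts behind A's (n-1-key)//k + 1 formula
lemma mod_le_self_int (m k : Int) (h0 : 0 ≤ m) (hk : 1 ≤ k) : PySem.Int.mod m k ≤ m := by
  have h1 := PySem.Int.floordiv_mul_add_mod m k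
  have h2 : 0 ≤ PySem.Int.floordiv m k := by
    rw [PySem.Int.floordiv_eq_ediv_of_pos (by omega)]
    exact Int.ediv_nonneg h0 (by omega)
  nlinarith

lemma mod_small_int (m k : Int) (h0 : 0 ≤ m) (h : m < k) : PySem.Int.mod m k = m := by
  have h1 := PySem.Int.floordiv_mul_add_mod m k
  have h2 : PySem.Int.floordiv m k = 0 := by
    rw [PySem.Int.floordiv_eq_iff_of_pos (by omega)]
    constructor <;> nlinarith
  rw [h2, zero_mul] at h1
  omega

lemma fdiv_zero_int (k : Int) (hk : 1 ≤ k) : PySem.Int.floordiv 0 k = 0 := by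
  rw [PySem.Int.floordiv_eq_iff_of_pos (by omega)]
  constructor <;> nlinarith

lemma fdiv_shift (k r m : Int) (hk : 1 ≤ k) (h0 : 0 ≤ r) (hrk : r < k)
    (hne : r ≠ PySem.Int.mod m k) :
    PySem.Int.floordiv (m - 1 - r) k = PySem.Int.floordiv (m - r) k := by
  have h1 := PySem.Int.floordiv_mul_add_mod m k
  have h2 := PySem.Int.mod_nonneg m (show (0 : Int) < k by omega)
  have h3 := PySem.Int.mod_lt m (show (0 : Int) < k by omega)
  set q := PySem.Int.floordiv m k with hq
  set r0 := PySem.Int.mod m k with hr0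
  rcases lt_or_gt_of_ne hne with h | h
  · have e1 : PySem.Int.floordiv (m - 1 - r) k = q := by
      rw [PySem.Int.floordiv_eq_iff_of_pos (by omega)]
      constructor <;> nlinarith
    have e2 : PySem.Int.floordiv (m - r) k = q := by
      rw [PySem.Int.floordiv_eq_iff_of_pos (by omega)]
      constructor <;> nlinarith
    rw [e1, e2]
  · have e1 : PySem.Int.floordiv (m - 1 - r) k = q - 1 := by
      rw [PySem.Int.floordiv_eq_iff_of_pos (by omega)]
      constructor <;> nlinarith
    have e2 : PySem.Int.floordiv (m - r) k = q - 1 := by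
      rw [PySem.Int.floordiv_eq_iff_of_pos (by omega)]
      constructor <;> nlinarith
    rw [e1, e2]

lemma fdiv_mod_succ (m k : Int) (hk : 1 ≤ k) :
    PySem.Int.floordiv (m - 1 - PySem.Int.mod m k) k + 1
      = PySem.Int.floordiv (m - PySem.Int.mod m k) k := by
  have h1 := PySem.Int.floordiv_mul_add_mod m k
  set q := PySem.Int.floordiv m k with hq
  have e1 : PySem.Int.floordiv (m - 1 - PySem.Int.mod m k) k = q - 1 := by
    rw [PySem.Int.floordiv_eq_iff_of_pos (by omega)]
    constructor <;> nlinarith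
  have e2 : PySem.Int.floordiv (m - PySem.Int.mod m k) k = q := by
    rw [PySem.Int.floordiv_eq_iff_of_pos (by omega)]
    constructor <;> nlinarith
  rw [e1, e2]
  ring

-- the two grouping loops build dictionaries with the same keys; A's value is the patience
-- pile of B's bucket, and B's bucket length satisfies A's floor-division count formula
lemma dict_inv (k : Int) (hk : 1 ≤ k) (arr : List Int) :
    ((PySem.List.enumerate arr 0).foldl (pvStepA k) PySem.Dict.empty).items
        = ((PySem.List.enumerate arr 0).foldl (pvStepB k) PySem.Dict.empty).items.map
            (fun p => (p.1, pileOf p.2))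
    ∧ ((PySem.List.enumerate arr 0).foldl (pvStepB k) PySem.Dict.empty).keys.Nodup
    ∧ (∀ r : Int,
        ((PySem.List.enumerate arr 0).foldl (pvStepB k) PySem.Dict.empty).contains r = true ↔
          0 ≤ r ∧ r < k ∧ r < (arr.length : Int))
    ∧ (∀ p ∈ ((PySem.List.enumerate arr 0).foldl (pvStepB k) PySem.Dict.empty).items,
        (p.2.length : Int) = PySem.Int.floordiv ((arr.length : Int) - 1 - p.1) k + 1) := by
  induction arr using List.reverseRecOn with
  | nil =>
    refine ⟨rfl, by simp [PySem.List.enumerate_nil], ?_, ?_⟩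
    · intro r
      simp [PySem.List.enumerate_nil, PySem.Dict.contains_empty]
      omega
    · intro p hp
      simp only [PySem.List.enumerate_nil, List.foldl_nil] at hp
      rw [show PySem.Dict.empty.items = ([] : List (Int × List Int)) from rfl] at hp
      simp at hp
  | append_singleton t x ih =>
    obtain ⟨hitems, hnodup, hcont, hlen⟩ := ih
    set dA := (PySem.List.enumerate t 0).foldl (pvStepA k) PySem.Dict.empty with hdA
    set dB := (PySem.List.enumerate t 0).foldl (pvStepB k) PySem.Dict.empty with hdB
    set m : Int := (t.length : Int) with hm
    have hstep : ∀ (f : PySem.Dict Int (List Int) → Int × Int → PySem.Dict Int (List Int)),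
        (PySem.List.enumerate (t ++ [x]) 0).foldl f PySem.Dict.empty
          = f ((PySem.List.enumerate t 0).foldl f PySem.Dict.empty) (m, x) := by
      intro f
      rw [PySem.List.enumerate_append, List.foldl_append, PySem.List.enumerate_cons,
          PySem.List.enumerate_nil]
      simp [← hm]
    rw [hstep (pvStepA k), hstep (pvStepB k)]
    set r0 := PySem.Int.mod m k with hr0def
    have hm0 : 0 ≤ m := by positivity
    have h0 : 0 ≤ r0 := PySem.Int.mod_nonneg m (by omega)
    have hrk : r0 < k := PySem.Int.mod_lt m (by omega)
    have hr0m : r0 ≤ m := mod_le_self_int m k hm0 hk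
    have hkeysA : dA.keys = dB.keys := by
      show dA.items.map Prod.fst = dB.items.map Prod.fst
      rw [hitems, List.map_map]
      rfl
    have hnodupA : dA.keys.Nodup := hkeysA ▸ hnodup
    have hcontA : ∀ r, dA.contains r = dB.contains r := by
      intro r
      rw [PySem.Dict.contains_eq_decide_mem_keys, PySem.Dict.contains_eq_decide_mem_keys,
          hkeysA]
    have hlength : ((t ++ [x]).length : Int) = m + 1 := by
      simp [hm]
    by_cases hc : dB.contains r0 = true
    · -- existing class: B appends to the bucket, A performs one patience step
      have hr0m' : r0 < m := ((hcont r0).mp hc).2.2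
      obtain ⟨l, hget⟩ : ∃ l, dB.get? r0 = some l := by
        have := PySem.Dict.contains_eq_isSome_get? dB r0
        rw [hc] at this
        exact Option.isSome_iff_exists.mp this.symm
      have hmemB : (r0, l) ∈ dB.items := PySem.Dict.mem_items_of_get?_eq_some dB hget
      have hgetD : dB.getD r0 [] = l := PySem.Dict.getD_of_get?_eq_some dB [] hget
      have hmemA : (r0, pileOf l) ∈ dA.items := by
        rw [hitems]
        exact List.mem_map.mpr ⟨(r0, l), hmemB, rfl⟩
      have hgetDA : dA.getD r0 [] = pileOf l :=
        PySem.Dict.getD_of_mem_items dA hmemA hnodupA []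
      have hcA : dA.contains r0 = true := by rw [hcontA]; exact hc
      have hstepA : pvStepA k dA (m, x) = dA.insert r0 (pileOf (l ++ [x])) := by
        rw [pileOf_concat]
        unfold pvStepA pileStep
        simp only [← hr0def, PySem.Dict.setdefault_of_contains dA [] hcA, hgetDA]
        split_ifs <;> rfl
      have hstepB : pvStepB k dB (m, x) = dB.insert r0 (l ++ [x]) := by
        unfold pvStepB
        simp only [← hr0def, hgetD]
      rw [hstepA, hstepB]
      refine ⟨?_, ?_, ?_, ?_⟩
      · rw [PySem.Dict.items_insert_of_contains dA _ hcA,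
            PySem.Dict.items_insert_of_contains dB _ hc, hitems, List.map_map, List.map_map]
        apply List.map_congr_left
        intro p hp
        by_cases hpr : p.1 = r0 <;> simp [hpr]
      · rw [PySem.Dict.keys_insert_of_contains dB _ hc]
        exact hnodup
      · intro r
        rw [PySem.Dict.contains_insert, hlength]
        by_cases hrr : r = r0
        · subst hrr
          simp only [Bool.or_eq_true, beq_self_eq_true, true_or, true_iff]
          omega
        · simp only [Bool.or_eq_true, beq_iff_eq, hrr, false_or, hcont r]
          constructor
          · rintro ⟨a, b, c⟩; exact ⟨a, b, by omega⟩
          · rintro ⟨a, b, c⟩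
            refine ⟨a, b, ?_⟩
            rcases lt_or_eq_of_le (by omega : r ≤ m) with h | h
            · exact h
            · exfalso; apply hrr; rw [hr0def, ← h, mod_small_int r k a b]
      · intro p hp
        rw [PySem.Dict.items_insert_of_contains dB _ hc] at hp
        obtain ⟨p0, hp0, rfl⟩ := List.mem_map.mp hp
        by_cases hpr : p0.1 = r0
        · have hp02 : p0.2 = l := by
            have := PySem.Dict.get?_of_mem_items dB
              (show (r0, p0.2) ∈ dB.items by rw [← hpr]; exact hp0) hnodup
            rw [hget] at this
            exact (Option.some.injEq _ _).mp this.symm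
          simp only [hpr, beq_self_eq_true, if_pos]
          have hl := hlen (r0, l) hmemB
          simp only at hl
          rw [hlength, show m + 1 - 1 - r0 = m - r0 by ring]
          have := fdiv_mod_succ m k hk
          rw [← hr0def] at this
          simp only [List.length_append, List.length_singleton]
          push_cast
          omega
        · simp only [beq_iff_eq, hpr, if_false, hlength]
          have hl := hlen p0 hp0
          have hpk : dB.contains p0.1 = true :=
            (PySem.Dict.contains_iff_mem_keys dB p0.1).mpr
              (PySem.Dict.mem_keys_of_mem_items dB hp0)
          obtain ⟨ha, hb, _⟩ := (hcont p0.1).mp hpk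
          have := fdiv_shift k p0.1 m hk ha hb (hr0def ▸ hpr)
          rw [show m + 1 - 1 - p0.1 = m - p0.1 by ring, ← this,
              show m - 1 - p0.1 = m - 1 - p0.1 by ring]
          exact hl
    · -- fresh class: the first element of residue r0 = m arrives
      have hcB : dB.contains r0 = false := by
        rw [← Bool.not_eq_true]
        exact hc
      have hr0m' : r0 = m := by
        by_contra hne
        exact hc ((hcont r0).mpr ⟨h0, hrk, lt_of_le_of_ne hr0m hne⟩)
      have hcA : dA.contains r0 = false := by rw [hcontA]; exact hcB
      have hstepB : pvStepB k dB (m, x) = dB.insert r0 [x] := by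
        unfold pvStepB
        simp only [← hr0def, PySem.Dict.getD_of_not_contains dB [] hcB, List.nil_append]
      have hstepA : pvStepA k dA (m, x) = dA.insert r0 [x] := by
        unfold pvStepA
        simp only [← hr0def, PySem.Dict.setdefault_of_not_contains dA [] hcA,
          PySem.Dict.getD_insert_self, List.length_nil, bisectRight_nil, List.nil_append]
        simp [PySem.Dict.insert_insert_self]
      rw [hstepA, hstepB]
      refine ⟨?_, ?_, ?_, ?_⟩
      · rw [PySem.Dict.items_insert_of_not_contains dA _ hcA,
            PySem.Dict.items_insert_of_not_contains dB _ hcB, hitems, List.map_append,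
            List.map_cons, List.map_nil]
        have hx : pileOf [x] = [x] := rfl
        rw [hx]
      · rw [PySem.Dict.keys_insert_of_not_contains dB _ hcB]
        rw [List.nodup_append]
        refine ⟨hnodup, List.nodup_singleton r0, ?_⟩
        intro a ha b hb heq
        have hb' : b = r0 := by simpa using hb
        rw [heq, hb'] at ha
        exact hc ((PySem.Dict.contains_iff_mem_keys dB _).mpr ha)
      · intro r
        rw [PySem.Dict.contains_insert, hlength]
        by_cases hrr : r = r0
        · subst hrr
          simp only [Bool.or_eq_true, beq_self_eq_true, true_or, true_iff]
          omega
        · simp only [Bool.or_eq_true, beq_iff_eq, hrr, false_or, hcont r]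
          constructor
          · rintro ⟨a, b, c⟩; exact ⟨a, b, by omega⟩
          · rintro ⟨a, b, c⟩
            refine ⟨a, b, ?_⟩
            rcases lt_or_eq_of_le (by omega : r ≤ m) with h | h
            · exact h
            · exfalso; apply hrr; rw [hr0def, ← h, mod_small_int r k a b]
      · intro p hp
        rw [PySem.Dict.items_insert_of_not_contains dB _ hcB] at hp
        rcases List.mem_append.mp hp with h | h
        · have hl := hlen p h
          have hpk : dB.contains p.1 = true :=
            (PySem.Dict.contains_iff_mem_keys dB p.1).mpr
              (PySem.Dict.mem_keys_of_mem_items dB h)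
          obtain ⟨ha, hb, _⟩ := (hcont p.1).mp hpk
          have hne : p.1 ≠ r0 := by
            intro hx
            rw [hx] at hpk
            rw [hpk] at hcB
            exact Bool.true_eq_false.mp hcB
          have := fdiv_shift k p.1 m hk ha hb (hr0def ▸ hne)
          rw [hlength, show m + 1 - 1 - p.1 = m - p.1 by ring, ← this]
          exact hl
        · simp only [List.mem_singleton] at h
          subst h
          rw [hlength]
          simp only [List.length_singleton]
          rw [show m + 1 - 1 - r0 = 0 by omega, fdiv_zero_int k hk]
          norm_num

-- ===== VERDICT (by name: the statement is the Claim_ definition above) =====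
theorem lis_of_k_spec : Claim_equal_lis_of_k := by
  intro arr k _ hpre
  unfold Spec_lis_of_k lis_of_k lis_of_k_alt
  obtain ⟨hitems, _, _, hlen⟩ := dict_inv k hpre arr
  rw [PySem.List.foldl_add]
  show _ = (((PySem.List.enumerate arr 0).foldl (pvStepB k) PySem.Dict.empty).items.map
      Prod.snd).foldl (fun total seq => total + ((seq.length : Int) - pvLnds seq)) 0
  rw [List.foldl_map, PySem.List.foldl_add, hitems, List.map_map]
  have hmap := List.map_congr_left (l := ((PySem.List.enumerate arr 0).foldl (pvStepB k)
      PySem.Dict.empty).items)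
    (f := (fun p => PySem.Int.floordiv ((arr.length : Int) - 1 - p.1) k + 1
            - ((p.2 : List Int).length : Int)) ∘ (fun p => (p.1, pileOf p.2)))
    (g := fun p => ((p.2.length : Int) - pvLnds p.2))
    (by
      intro p hp
      simp only [Function.comp]
      rw [pvLnds_eq_pileLen]
      have := hlen p hp
      omega)
  rw [hmap]
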